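-- pv_equiv track=rewrite | github.com/Darkteman/homework_tensor | tasks_python/func_python/task_4_swap_places.py | swap_places
-- ===== SOURCE A (Python) =====
-- def swap_places(array):
--     max_item, index_max_item = array[0], 0
--     min_item, index_min_item = array[0], 0
--     for i in range(len(array)):
--         if array[i] > max_item:
--             max_item, index_max_item = array[i], i
--         if array[i] < min_item:
--             min_item, index_min_item = array[i], i
--     array[index_max_item], array[index_min_item] = array[index_min_item],  array[index_max_item]
--     return array
-- ===== SOURCE B (Python) =====
-- def _extremes(array, lo, hi):
--     # first-occurrence (index of) min and max of array[lo:hi], by divide and conquer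
--     if hi - lo <= 1:
--         return lo, lo
--     mid = (lo + hi) // 2
--     lmin, lmax = _extremes(array, lo, mid)
--     rmin, rmax = _extremes(array, mid, hi)
--     imin = lmin if array[lmin] <= array[rmin] else rmin
--     imax = lmax if array[lmax] >= array[rmax] else rmax
--     return imin, imax
--
--
-- def swap_places(array):
--     j, i = _extremes(array, 0, len(array))
--     array[i], array[j] = array[j], array[i]
--     return array
-- ===== Notes on version B (the rewrite author's own statement) =====
-- stated objective: alternative
-- what changed: Replaces A's single left-to-right tracking loop with a divide-and-conquer helper that recursively finds the first-occurrence min and max indices of each half of the index range and merges them (ties going to the left half, matching A's strict-inequality first-occurrence rule), then swaps those two positions.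
import Mathlib
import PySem

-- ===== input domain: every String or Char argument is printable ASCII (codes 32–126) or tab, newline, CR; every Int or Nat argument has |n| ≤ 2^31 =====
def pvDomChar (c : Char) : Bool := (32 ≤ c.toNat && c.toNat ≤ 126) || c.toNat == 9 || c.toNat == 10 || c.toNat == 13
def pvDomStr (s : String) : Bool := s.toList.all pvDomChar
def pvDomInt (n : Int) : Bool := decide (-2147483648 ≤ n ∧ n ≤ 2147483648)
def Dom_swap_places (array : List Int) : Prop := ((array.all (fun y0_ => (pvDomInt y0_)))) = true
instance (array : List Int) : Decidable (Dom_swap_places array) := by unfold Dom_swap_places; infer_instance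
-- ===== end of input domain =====

-- B finds the first-occurrence indices of min and max by divide and conquer on index ranges
-- instead of A's single left-to-right tracking loop (alternative algorithm; same asymptotic cost).
-- Both A and B mutate `array` in place in Python; the theorems are about the returned value.


-- ===== PORT A =====
-- A's for-loop over range(len(array)), visiting array[i] in order, threading
-- (max_item, index_max_item) and (min_item, index_min_item).
def pvLoopA : List Int → Nat → Int × Nat → Int × Nat → (Int × Nat) × (Int × Nat)
  | [], _, mx, mn => (mx, mn)
  | x :: xs, i, mx, mn =>
      pvLoopA xs (i + 1) (if mx.1 < x then (x, i) else mx) (if x < mn.1 then (x, i) else mn)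

def swap_places (array : List Int) : List Int :=
  match array with
  | [] => []        -- array[0] raises IndexError here; excluded by Pre_
  | a0 :: _ =>
    let r := pvLoopA array 0 (a0, 0) (a0, 0)
    let imax := r.1.2
    let imin := r.2.2
    -- the parallel assignment: reads array[index_min], array[index_max] (both in range), then writes
    (array.set imax (array.getD imin 0)).set imin (array.getD imax 0)

-- ===== PORT B =====
-- _extremes(array, lo, hi): first-occurrence indices of min and max of array[lo:hi],
-- by divide and conquer; all index reads array[k] are in range, so getD is exact.
def pvExtremes (array : List Int) (lo hi : Nat) : Nat × Nat :=
  if hi - lo ≤ 1 then (lo, lo)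
  else
    let mid := (lo + hi) / 2
    let l := pvExtremes array lo mid
    let r := pvExtremes array mid hi
    ((if array.getD l.1 0 ≤ array.getD r.1 0 then l.1 else r.1),
     (if array.getD r.2 0 ≤ array.getD l.2 0 then l.2 else r.2))
termination_by hi - lo
decreasing_by all_goals omega

def swap_places_alt (array : List Int) : List Int :=
  let p := pvExtremes array 0 array.length
  -- the swap: reads array[p.2], array[p.1] (in range for a nonempty list), then writes;
  -- on [] the Python reads array[0] and raises IndexError, excluded by Pre_
  (array.set p.2 (array.getD p.1 0)).set p.1 (array.getD p.2 0)

-- ===== PRECONDITION & SPEC =====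
-- On the empty list both A and B raise IndexError (array[0]); Pre_ excludes it.
def Pre_swap_places (array : List Int) : Prop := array ≠ []
instance (array : List Int) : Decidable (Pre_swap_places array) := by unfold Pre_swap_places; infer_instance
def pvWitness_swap_places : List Int := [3, 1, 2]

def Spec_swap_places (array : List Int) (out : List Int) : Prop := out = swap_places_alt array
instance (array : List Int) (out : List Int) : Decidable (Spec_swap_places array out) := by unfold Spec_swap_places; infer_instance

-- ===== CLAIM (what is proved, stated in full; the proofs are below) =====
def Claim_equal_swap_places : Prop := ∀ (array : List Int), Dom_swap_places array → Pre_swap_places array → Spec_swap_places array (swap_places array)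

-- ===== LEMMAS AND PROOFS =====

-- "a is the first index of [lo,hi) attaining the minimum (resp. maximum) of array.getD · 0"
def pvFirstMin (array : List Int) (lo hi a : Nat) : Prop :=
  lo ≤ a ∧ a < hi ∧ (∀ k, lo ≤ k → k < hi → array.getD a 0 ≤ array.getD k 0) ∧
    (∀ k, lo ≤ k → k < a → array.getD a 0 < array.getD k 0)

def pvFirstMax (array : List Int) (lo hi a : Nat) : Prop :=
  lo ≤ a ∧ a < hi ∧ (∀ k, lo ≤ k → k < hi → array.getD k 0 ≤ array.getD a 0) ∧
    (∀ k, lo ≤ k → k < a → array.getD k 0 < array.getD a 0)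

theorem pvFirstMin_unique {array : List Int} {lo hi a b : Nat}
    (ha : pvFirstMin array lo hi a) (hb : pvFirstMin array lo hi b) : a = b := by
  obtain ⟨ha1, ha2, ha3, ha4⟩ := ha
  obtain ⟨hb1, hb2, hb3, hb4⟩ := hb
  rcases Nat.lt_trichotomy a b with h | h | h
  · exact absurd (hb4 a ha1 h) (not_lt.2 (ha3 b hb1 hb2))
  · exact h
  · exact absurd (ha4 b hb1 h) (not_lt.2 (hb3 a ha1 ha2))

theorem pvFirstMax_unique {array : List Int} {lo hi a b : Nat}
    (ha : pvFirstMax array lo hi a) (hb : pvFirstMax array lo hi b) : a = b := by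
  obtain ⟨ha1, ha2, ha3, ha4⟩ := ha
  obtain ⟨hb1, hb2, hb3, hb4⟩ := hb
  rcases Nat.lt_trichotomy a b with h | h | h
  · exact absurd (hb4 a ha1 h) (not_lt.2 (ha3 b hb1 hb2))
  · exact h
  · exact absurd (ha4 b hb1 h) (not_lt.2 (hb3 a ha1 ha2))

-- B's divide and conquer returns the first indices of min and max of the range.
theorem pvExtremes_spec (array : List Int) : ∀ (lo hi : Nat), lo < hi →
    pvFirstMin array lo hi (pvExtremes array lo hi).1 ∧
      pvFirstMax array lo hi (pvExtremes array lo hi).2 := by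
  intro lo hi
  induction lo, hi using pvExtremes.induct array with
  | case1 lo hi hle =>
    intro hlt
    have hk : ∀ k, lo ≤ k → k < hi → k = lo := by omega
    rw [pvExtremes, if_pos hle]
    refine ⟨⟨le_refl _, hlt, ?_, ?_⟩, ⟨le_refl _, hlt, ?_, ?_⟩⟩
    · intro k h1 h2; rw [hk k h1 h2]
    · intro k h1 h2; omega
    · intro k h1 h2; rw [hk k h1 h2]
    · intro k h1 h2; omega
  | case2 lo hi hle mid ihl ihr =>
    intro _
    have hlm : lo < mid := by omega
    have hmh : mid < hi := by omega
    obtain ⟨⟨l1, l2, l3, l4⟩, ⟨L1, L2, L3, L4⟩⟩ := ihl hlm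
    obtain ⟨⟨r1, r2, r3, r4⟩, ⟨R1, R2, R3, R4⟩⟩ := ihr hmh
    set l := pvExtremes array lo mid with hl
    set r := pvExtremes array mid hi with hr
    rw [pvExtremes, if_neg hle]
    show pvFirstMin array lo hi (if array.getD l.1 0 ≤ array.getD r.1 0 then l.1 else r.1) ∧
      pvFirstMax array lo hi (if array.getD r.2 0 ≤ array.getD l.2 0 then l.2 else r.2)
    constructor
    · by_cases h : array.getD l.1 0 ≤ array.getD r.1 0
      · rw [if_pos h]
        refine ⟨l1, by omega, ?_, ?_⟩
        · intro k h1 h2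
          by_cases hk : k < mid
          · exact l3 k h1 hk
          · exact le_trans (le_trans h (r3 k (by omega) h2)) (le_refl _)
        · intro k h1 h2; exact l4 k h1 h2
      · rw [if_neg h]
        push Not at h
        refine ⟨by omega, r2, ?_, ?_⟩
        · intro k h1 h2
          by_cases hk : k < mid
          · exact le_of_lt (lt_of_lt_of_le h (l3 k h1 hk))
          · exact r3 k (by omega) h2
        · intro k h1 h2
          by_cases hk : k < mid
          · exact lt_of_lt_of_le h (l3 k h1 hk)
          · exact r4 k (by omega) h2
    · by_cases h : array.getD r.2 0 ≤ array.getD l.2 0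
      · rw [if_pos h]
        refine ⟨L1, by omega, ?_, ?_⟩
        · intro k h1 h2
          by_cases hk : k < mid
          · exact L3 k h1 hk
          · exact le_trans (R3 k (by omega) h2) h
        · intro k h1 h2; exact L4 k h1 h2
      · rw [if_neg h]
        push Not at h
        refine ⟨by omega, R2, ?_, ?_⟩
        · intro k h1 h2
          by_cases hk : k < mid
          · exact le_of_lt (lt_of_le_of_lt (L3 k h1 hk) h)
          · exact R3 k (by omega) h2
        · intro k h1 h2
          by_cases hk : k < mid
          · exact lt_of_le_of_lt (L3 k h1 hk) h
          · exact R4 k (by omega) h2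

-- A's combined loop is the pair of two independent scans.
def pvMaxScan : List Int → Nat → Int × Nat → Int × Nat
  | [], _, mx => mx
  | x :: xs, i, mx => pvMaxScan xs (i + 1) (if mx.1 < x then (x, i) else mx)

def pvMinScan : List Int → Nat → Int × Nat → Int × Nat
  | [], _, mn => mn
  | x :: xs, i, mn => pvMinScan xs (i + 1) (if x < mn.1 then (x, i) else mn)

theorem pvLoopA_eq (xs : List Int) : ∀ (i : Nat) (mx mn : Int × Nat),
    pvLoopA xs i mx mn = (pvMaxScan xs i mx, pvMinScan xs i mn) := by
  induction xs with
  | nil => intro i mx mn; rfl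
  | cons x xs ih => intro i mx mn; simp [pvLoopA, pvMaxScan, pvMinScan, ih]

-- Invariant: if v is an upper bound of the prefix `pre` with first occurrence k,
-- the scan over the rest yields an upper bound of the whole list with its first occurrence.
theorem pvMaxScan_key (xs : List Int) : ∀ (pre : List Int) (v : Int) (k : Nat),
    (∀ y ∈ pre, y ≤ v) → PySem.List.index? pre v = some k →
    (∀ y ∈ pre ++ xs, y ≤ (pvMaxScan xs pre.length (v, k)).1) ∧
      PySem.List.index? (pre ++ xs) (pvMaxScan xs pre.length (v, k)).1
        = some (pvMaxScan xs pre.length (v, k)).2 := by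
  induction xs with
  | nil => intro pre v k hub hidx; simpa [pvMaxScan] using ⟨hub, hidx⟩
  | cons x xs ih =>
    intro pre v k hub hidx
    have hmem : v ∈ pre := (PySem.List.index?_isSome_iff pre v).1 (by rw [hidx]; rfl)
    by_cases h : v < x
    · have h1 : ∀ y ∈ pre ++ [x], y ≤ x := by
        intro y hy
        rcases List.mem_append.1 hy with hy | hy
        · exact le_of_lt (lt_of_le_of_lt (hub y hy) h)
        · simp at hy; omega
      have hnot : x ∉ pre := fun hx => absurd (hub x hx) (by omega)
      have h2 : PySem.List.index? (pre ++ [x]) x = some pre.length :=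
        PySem.List.index?_append_singleton_self _ _ hnot
      have := ih (pre ++ [x]) x pre.length h1 h2
      simpa [pvMaxScan, h, List.append_assoc] using this
    · have h1 : ∀ y ∈ pre ++ [x], y ≤ v := by
        intro y hy
        rcases List.mem_append.1 hy with hy | hy
        · exact hub y hy
        · simp at hy; omega
      have h2 : PySem.List.index? (pre ++ [x]) v = some k := by
        rw [PySem.List.index?_append_of_mem [x] hmem]; exact hidx
      have := ih (pre ++ [x]) v k h1 h2
      simpa [pvMaxScan, h, List.append_assoc] using this

theorem pvMinScan_key (xs : List Int) : ∀ (pre : List Int) (v : Int) (k : Nat),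
    (∀ y ∈ pre, v ≤ y) → PySem.List.index? pre v = some k →
    (∀ y ∈ pre ++ xs, (pvMinScan xs pre.length (v, k)).1 ≤ y) ∧
      PySem.List.index? (pre ++ xs) (pvMinScan xs pre.length (v, k)).1
        = some (pvMinScan xs pre.length (v, k)).2 := by
  induction xs with
  | nil => intro pre v k hub hidx; simpa [pvMinScan] using ⟨hub, hidx⟩
  | cons x xs ih =>
    intro pre v k hub hidx
    have hmem : v ∈ pre := (PySem.List.index?_isSome_iff pre v).1 (by rw [hidx]; rfl)
    by_cases h : x < v
    · have h1 : ∀ y ∈ pre ++ [x], x ≤ y := by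
        intro y hy
        rcases List.mem_append.1 hy with hy | hy
        · exact le_of_lt (lt_of_lt_of_le h (hub y hy))
        · simp at hy; omega
      have hnot : x ∉ pre := fun hx => absurd (hub x hx) (by omega)
      have h2 : PySem.List.index? (pre ++ [x]) x = some pre.length :=
        PySem.List.index?_append_singleton_self _ _ hnot
      have := ih (pre ++ [x]) x pre.length h1 h2
      simpa [pvMinScan, h, List.append_assoc] using this
    · have h1 : ∀ y ∈ pre ++ [x], v ≤ y := by
        intro y hy
        rcases List.mem_append.1 hy with hy | hy
        · exact hub y hy
        · simp at hy; omega
      have h2 : PySem.List.index? (pre ++ [x]) v = some k := by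
        rw [PySem.List.index?_append_of_mem [x] hmem]; exact hidx
      have := ih (pre ++ [x]) v k h1 h2
      simpa [pvMinScan, h, List.append_assoc] using this

-- "v is a lower bound and k its first occurrence" is the index-based first-min property.
theorem pvFirstMin_of_index {array : List Int} {v : Int} {k : Nat}
    (hlb : ∀ y ∈ array, v ≤ y) (hidx : PySem.List.index? array v = some k) :
    pvFirstMin array 0 array.length k := by
  obtain ⟨hk, hget, hfirst⟩ := PySem.List.getElem_of_index?_eq_some hidx
  refine ⟨Nat.zero_le _, hk, ?_, ?_⟩
  · intro j _ hj
    rw [List.getD_eq_getElem array 0 hk, hget, List.getD_eq_getElem array 0 hj]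
    exact hlb _ (List.getElem_mem hj)
  · intro j _ hj
    have hjlen : j < array.length := lt_trans hj hk
    rw [List.getD_eq_getElem array 0 hk, hget, List.getD_eq_getElem array 0 hjlen]
    exact lt_of_le_of_ne (hlb _ (List.getElem_mem hjlen)) (fun h => hfirst j hj h.symm)

theorem pvFirstMax_of_index {array : List Int} {v : Int} {k : Nat}
    (hub : ∀ y ∈ array, y ≤ v) (hidx : PySem.List.index? array v = some k) :
    pvFirstMax array 0 array.length k := by
  obtain ⟨hk, hget, hfirst⟩ := PySem.List.getElem_of_index?_eq_some hidx
  refine ⟨Nat.zero_le _, hk, ?_, ?_⟩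
  · intro j _ hj
    rw [List.getD_eq_getElem array 0 hk, hget, List.getD_eq_getElem array 0 hj]
    exact hub _ (List.getElem_mem hj)
  · intro j _ hj
    have hjlen : j < array.length := lt_trans hj hk
    rw [List.getD_eq_getElem array 0 hk, hget, List.getD_eq_getElem array 0 hjlen]
    exact lt_of_le_of_ne (hub _ (List.getElem_mem hjlen)) (fun h => hfirst j hj h)

-- ===== VERDICT (by name: the statement is the Claim_ definition above) =====
theorem swap_places_spec : Claim_equal_swap_places := by
  intro array _hdom hpre
  unfold Spec_swap_places
  match array, hpre with
  | a0 :: rest, _ =>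
    -- A's indices
    have hA : swap_places (a0 :: rest)
        = ((a0 :: rest).set (pvMaxScan rest 1 (a0, 0)).2
              ((a0 :: rest).getD (pvMinScan rest 1 (a0, 0)).2 0)).set
            (pvMinScan rest 1 (a0, 0)).2
            ((a0 :: rest).getD (pvMaxScan rest 1 (a0, 0)).2 0) := by
      simp [swap_places, pvLoopA, pvLoopA_eq]
    have hInit : PySem.List.index? [a0] a0 = some 0 := PySem.List.index?_cons_self a0 []
    have hmax := pvMaxScan_key rest [a0] a0 0 (by intro y hy; simp at hy; omega) hInit
    have hmin := pvMinScan_key rest [a0] a0 0 (by intro y hy; simp at hy; omega) hInit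
    simp only [List.length_singleton, List.singleton_append] at hmax hmin
    have hAmax : pvFirstMax (a0 :: rest) 0 (a0 :: rest).length (pvMaxScan rest 1 (a0, 0)).2 :=
      pvFirstMax_of_index hmax.1 hmax.2
    have hAmin : pvFirstMin (a0 :: rest) 0 (a0 :: rest).length (pvMinScan rest 1 (a0, 0)).2 :=
      pvFirstMin_of_index hmin.1 hmin.2
    -- B's indices
    obtain ⟨hBmin, hBmax⟩ := pvExtremes_spec (a0 :: rest) 0 (a0 :: rest).length (by simp)
    -- the first-extremal index is unique, so the two programs swap the same positions
    have e1 : (pvMaxScan rest 1 (a0, 0)).2 = (pvExtremes (a0 :: rest) 0 (a0 :: rest).length).2 :=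
      pvFirstMax_unique hAmax hBmax
    have e2 : (pvMinScan rest 1 (a0, 0)).2 = (pvExtremes (a0 :: rest) 0 (a0 :: rest).length).1 :=
      pvFirstMin_unique hAmin hBmin
    rw [hA, e1, e2]
    rfl
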